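-- pv_equiv track=rewrite | github.com/ElchaabiMohamed/InferCode_SVM | NC-5690-python-files/program_2686.py | nbVoyelles
-- ===== SOURCE A (Python) =====
-- def nbVoyelles(mot):
--   res=0
--   for c in mot:
--     if c in "aeiouy":
--       res=res+1
--     else:
--       res=0
--   return res
-- ===== SOURCE B (Python) =====
-- def nbVoyelles(mot):
--   n = 0
--   for c in reversed(mot):
--     if c in "aeiouy":
--       n += 1
--     else:
--       break
--   return n
-- ===== Notes on version B (the rewrite author's own statement) =====
-- stated objective: idiomatic
-- what changed: Scans the word backwards and stops at the first non-vowel instead of a forward pass over the whole word that resets an accumulator.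
import Mathlib
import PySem

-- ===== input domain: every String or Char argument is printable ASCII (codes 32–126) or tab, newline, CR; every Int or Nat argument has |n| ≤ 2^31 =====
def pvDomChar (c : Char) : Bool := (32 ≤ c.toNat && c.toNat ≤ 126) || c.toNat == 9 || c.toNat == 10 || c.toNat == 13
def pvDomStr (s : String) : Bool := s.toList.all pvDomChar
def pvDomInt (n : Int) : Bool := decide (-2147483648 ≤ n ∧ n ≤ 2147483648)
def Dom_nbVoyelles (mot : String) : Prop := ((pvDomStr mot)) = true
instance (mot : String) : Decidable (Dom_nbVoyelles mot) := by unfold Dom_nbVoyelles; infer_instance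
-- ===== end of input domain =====

-- B scans the word backwards and stops at the first non-vowel (idiomatic reverse early-exit)
-- instead of A's forward pass resetting an accumulator; same return value on all inputs.


-- ===== PORT A =====
-- 'c in "aeiouy"' ported as membership in the character list (exact for single chars)
def pvVowel (c : Char) : Bool := "aeiouy".toList.contains c

def nbVoyelles (mot : String) : Int :=
  mot.toList.foldl (fun res c => if pvVowel c then res + 1 else 0) 0

-- ===== PORT B =====
-- loop over reversed(mot) with counter and break
def pvCountRev (acc : Int) : List Char → Int
  | [] => acc
  | c :: t => if pvVowel c then pvCountRev (acc + 1) t else acc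

def nbVoyelles_alt (mot : String) : Int := pvCountRev 0 mot.toList.reverse

-- ===== PRECONDITION & SPEC =====
def Spec_nbVoyelles (mot : String) (out : Int) : Prop := out = nbVoyelles_alt mot
instance (mot : String) (out : Int) : Decidable (Spec_nbVoyelles mot out) := by unfold Spec_nbVoyelles; infer_instance

-- ===== CLAIM (what is proved, stated in full; the proofs are below) =====
def Claim_equal_nbVoyelles : Prop := ∀ (mot : String), Dom_nbVoyelles mot → Spec_nbVoyelles mot (nbVoyelles mot)

-- ===== LEMMAS AND PROOFS =====

theorem pvCountRev_acc (l : List Char) : ∀ (acc : Int), pvCountRev acc l = acc + pvCountRev 0 l := by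
  induction l with
  | nil => intro acc; simp [pvCountRev]
  | cons c t ih =>
    intro acc
    by_cases h : pvVowel c = true <;> simp [pvCountRev, h, ih (acc + 1), ih 1] <;> ring

theorem foldl_eq_countRev (l : List Char) :
    l.foldl (fun res c => if pvVowel c then res + 1 else 0) 0 = pvCountRev 0 l.reverse := by
  induction l using List.reverseRecOn with
  | nil => simp [pvCountRev]
  | append_singleton t c ih =>
    rw [List.foldl_append, List.reverse_append]
    by_cases h : pvVowel c = true <;>
      simp [pvCountRev, h, ih, pvCountRev_acc t.reverse 1] <;> ring

-- ===== VERDICT (by name: the statement is the Claim_ definition above) =====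
theorem nbVoyelles_spec : Claim_equal_nbVoyelles := by
  intro mot _
  unfold Spec_nbVoyelles nbVoyelles nbVoyelles_alt
  exact foldl_eq_countRev mot.toList
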